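-- pv_equiv track=rewrite | github.com/snnn1/QTSW2 | tools/unknown_duplicate_burst_audit.py | max_events_in_ms_window
-- ===== SOURCE A (Python) =====
-- from typing import Any, Dict, List, Optional, Tuple
--
-- def max_events_in_ms_window(sorted_ts_ms: List[int], window_ms: int) -> int:
--     if not sorted_ts_ms:
--         return 0
--     best = 1
--     j = 0
--     n = len(sorted_ts_ms)
--     for i in range(n):
--         while j <= i and sorted_ts_ms[i] - sorted_ts_ms[j] > window_ms:
--             j += 1
--         best = max(best, i - j + 1)
--     return best
-- ===== SOURCE B (Python) =====
-- def max_events_in_ms_window(sorted_ts_ms, window_ms):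
--     if not sorted_ts_ms:
--         return 0
--     best = 1
--     window = []
--     for t in sorted_ts_ms:
--         window.append(t)
--         while window and t - window[0] > window_ms:
--             window.pop(0)
--         best = max(best, len(window))
--     return best
-- ===== Notes on version B (the rewrite author's own statement) =====
-- stated objective: alternative
-- what changed: Replaces the index-based two-pointer scan with a value-based sweep that maintains the current window as an explicit buffer: each timestamp is appended, stale timestamps are popped from the front, and the buffer's length is the window count.
import Mathlib
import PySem

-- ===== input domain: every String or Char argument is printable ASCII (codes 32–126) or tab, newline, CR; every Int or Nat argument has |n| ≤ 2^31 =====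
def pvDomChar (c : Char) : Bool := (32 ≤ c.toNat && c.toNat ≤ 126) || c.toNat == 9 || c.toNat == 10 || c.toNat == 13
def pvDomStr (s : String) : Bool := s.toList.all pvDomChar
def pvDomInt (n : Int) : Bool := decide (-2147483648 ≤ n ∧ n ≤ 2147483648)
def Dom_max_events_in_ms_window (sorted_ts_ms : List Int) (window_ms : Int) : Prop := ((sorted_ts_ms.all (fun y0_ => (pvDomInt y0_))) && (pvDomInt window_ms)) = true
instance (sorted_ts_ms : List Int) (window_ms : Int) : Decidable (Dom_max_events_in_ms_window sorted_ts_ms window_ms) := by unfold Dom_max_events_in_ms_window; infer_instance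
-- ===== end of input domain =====

-- B replaces A's index-based two-pointer scan with a value-based sweep over an explicit window buffer (alternative algorithm, not faster).


-- ===== PORT A =====
-- the inner 'while j <= i and sorted_ts_ms[i] - sorted_ts_ms[j] > window_ms: j += 1'
def pyWhileAdvance (sorted_ts_ms : List Int) (window_ms i j : Int) : Int :=
  if h : j ≤ i ∧ PySem.List.pyGetD sorted_ts_ms i 0 - PySem.List.pyGetD sorted_ts_ms j 0 > window_ms then
    pyWhileAdvance sorted_ts_ms window_ms i (j + 1)
  else j
termination_by (i + 1 - j).toNat
decreasing_by omega

def max_events_in_ms_window (sorted_ts_ms : List Int) (window_ms : Int) : Int :=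
  if sorted_ts_ms = [] then 0
  else
    let n : Int := sorted_ts_ms.length
    ((PySem.List.pyRange 0 n 1).foldl
      (fun (s : Int × Int) i =>
        let j := pyWhileAdvance sorted_ts_ms window_ms i s.2
        (max s.1 (i - j + 1), j)) (1, 0)).1

-- ===== PORT B =====
-- Source B's 'while window and t - window[0] > window_ms: window.pop(0)'
def pvPopWhile (t window_ms : Int) (window : List Int) : List Int :=
  match window with
  | [] => []
  | x :: rest => if t - x > window_ms then pvPopWhile t window_ms rest else x :: rest

def max_events_in_ms_window_alt (sorted_ts_ms : List Int) (window_ms : Int) : Int :=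
  if sorted_ts_ms = [] then 0
  else
    (sorted_ts_ms.foldl
      (fun (s : Int × List Int) t =>
        let window := pvPopWhile t window_ms (s.2 ++ [t])
        (max s.1 (window.length : Int), window)) (1, [])).1

-- ===== PRECONDITION & SPEC =====
def Spec_max_events_in_ms_window (sorted_ts_ms : List Int) (window_ms : Int) (out : Int) : Prop := out = max_events_in_ms_window_alt sorted_ts_ms window_ms
instance (sorted_ts_ms : List Int) (window_ms : Int) (out : Int) : Decidable (Spec_max_events_in_ms_window sorted_ts_ms window_ms out) := by unfold Spec_max_events_in_ms_window; infer_instance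

-- ===== CLAIM (what is proved, stated in full; the proofs are below) =====
def Claim_equal_max_events_in_ms_window : Prop := ∀ (sorted_ts_ms : List Int) (window_ms : Int), Dom_max_events_in_ms_window sorted_ts_ms window_ms → Spec_max_events_in_ms_window sorted_ts_ms window_ms (max_events_in_ms_window sorted_ts_ms window_ms)

-- ===== LEMMAS AND PROOFS =====

-- A's pointer advance and B's front-popping walk the same steps: from position j on the
-- window ts[j..m], A lands at j' and B's buffer becomes ts[j'..m].
theorem popWhile_advance (ts : List Int) (w : Int) (m : Nat) (hm : m < ts.length) :
    ∀ (fuel j : Nat), j ≤ m + 1 → m + 1 - j ≤ fuel →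
    ∃ j' : Nat, pyWhileAdvance ts w (m : Int) (j : Int) = (j' : Int) ∧ j ≤ j' ∧ j' ≤ m + 1 ∧
      pvPopWhile ts[m] w ((ts.take (m + 1)).drop j) = (ts.take (m + 1)).drop j' := by
  intro fuel
  induction fuel with
  | zero =>
    intro j hj hf
    have hj' : j = m + 1 := by omega
    subst hj'
    refine ⟨m + 1, ?_, le_rfl, le_rfl, ?_⟩
    · rw [pyWhileAdvance]
      rw [dif_neg (by push_cast; omega)]
    · rw [List.drop_of_length_le (by simp)]
      rfl
  | succ fuel ih =>
    intro j hj hf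
    have hlen : (ts.take (m + 1)).length = m + 1 := by simp; omega
    by_cases hje : j = m + 1
    · subst hje
      refine ⟨m + 1, ?_, le_rfl, le_rfl, ?_⟩
      · rw [pyWhileAdvance]; rw [dif_neg (by push_cast; omega)]
      · rw [List.drop_of_length_le (by omega)]; rfl
    · have hjm : j ≤ m := by omega
      have hjlt : j < ts.length := by omega
      have hdrop : (ts.take (m + 1)).drop j = ts[j] :: (ts.take (m + 1)).drop (j + 1) := by
        rw [List.drop_eq_getElem_cons (by omega)]
        congr 1
        exact List.getElem_take
      by_cases hcond : ts[m] - ts[j] > w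
      · obtain ⟨j', h1, h2, h3, h4⟩ := ih (j + 1) (by omega) (by omega)
        refine ⟨j', ?_, by omega, h3, ?_⟩
        · rw [pyWhileAdvance]
          rw [dif_pos ?_]
          · exact_mod_cast h1
          · constructor
            · omega
            · simp only [PySem.List.pyGetD_natCast]
              rw [List.getD_eq_getElem ts 0 (by omega), List.getD_eq_getElem ts 0 hjlt]
              omega
        · rw [hdrop]
          unfold pvPopWhile
          rw [if_pos hcond]
          exact h4
      · refine ⟨j, ?_, le_rfl, by omega, ?_⟩
        · rw [pyWhileAdvance]
          rw [dif_neg ?_]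
          simp only [not_and, not_lt]
          intro _
          simp only [PySem.List.pyGetD_natCast]
          rw [List.getD_eq_getElem ts 0 (by omega), List.getD_eq_getElem ts 0 hjlt]
          omega
        · rw [hdrop]
          unfold pvPopWhile
          rw [if_neg hcond]

-- the two folds run in lockstep: equal running maxima, and B's buffer is ts[j..m) for A's pointer j
theorem fold_inv (ts : List Int) (w : Int) (m : Nat) (hm : m ≤ ts.length) :
    ∃ j : Nat, j ≤ m ∧
      ((PySem.List.pyRange 0 (m : Int) 1).foldl
        (fun (s : Int × Int) i =>
          let j := pyWhileAdvance ts w i s.2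
          (max s.1 (i - j + 1), j)) (1, 0))
      = (((ts.take m).foldl
          (fun (s : Int × List Int) t =>
            let window := pvPopWhile t w (s.2 ++ [t])
            (max s.1 (window.length : Int), window)) (1, [])).1, (j : Int)) ∧
      ((ts.take m).foldl
          (fun (s : Int × List Int) t =>
            let window := pvPopWhile t w (s.2 ++ [t])
            (max s.1 (window.length : Int), window)) (1, [])).2 = (ts.take m).drop j := by
  induction m with
  | zero =>
    refine ⟨0, le_rfl, ?_, ?_⟩
    · rw [PySem.List.pyRange_one_eq_nil (by norm_num)]; rfl
    · rfl
  | succ m ih =>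
    obtain ⟨j, hj, hA, hB⟩ := ih (by omega)
    have hmlt : m < ts.length := by omega
    have hrange : PySem.List.pyRange 0 ((m + 1 : Nat) : Int) 1
        = PySem.List.pyRange 0 (m : Int) 1 ++ [(m : Int)] := by
      push_cast
      exact PySem.List.pyRange_one_succ_right (by positivity)
    have htake : ts.take (m + 1) = ts.take m ++ [ts[m]] := by
      rw [List.take_add_one, List.getElem?_eq_getElem hmlt]
      rfl
    obtain ⟨j', h1, h2, h3, h4⟩ := popWhile_advance ts w m hmlt (m + 1 - j) j (by omega) le_rfl
    have hwin0 : ((ts.take m).foldl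
          (fun (s : Int × List Int) t =>
            let window := pvPopWhile t w (s.2 ++ [t])
            (max s.1 (window.length : Int), window)) (1, [])).2 ++ [ts[m]]
        = (ts.take (m + 1)).drop j := by
      rw [hB, htake, List.drop_append_of_le_length (by simp; omega)]
    refine ⟨j', by omega, ?_, ?_⟩
    · rw [hrange, List.foldl_append, hA, htake, List.foldl_append]
      simp only [List.foldl_cons, List.foldl_nil]
      rw [hwin0, h4, h1]
      have hlen : (((ts.take (m + 1)).drop j').length : Int) = (m : Int) - (j' : Int) + 1 := by
        rw [List.length_drop]
        have : (ts.take (m + 1)).length = m + 1 := by simp; omega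
        rw [this]
        omega
      rw [hlen]
    · rw [htake, List.foldl_append]
      simp only [List.foldl_cons, List.foldl_nil]
      rw [hwin0, h4, ← htake]

-- ===== VERDICT (by name: the statement is the Claim_ definition above) =====
theorem max_events_in_ms_window_spec : Claim_equal_max_events_in_ms_window := by
  intro ts w _
  unfold Spec_max_events_in_ms_window max_events_in_ms_window max_events_in_ms_window_alt
  by_cases hnil : ts = []
  · simp [hnil]
  · simp only [hnil, if_false]
    obtain ⟨j, _, hA, _⟩ := fold_inv ts w ts.length le_rfl
    rw [List.take_length] at hA
    rw [hA]
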